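-- pv_equiv track=rewrite | github.com/Jcan7/FPHICL-main | code/data.py | get_sentiment_label
-- ===== SOURCE A (Python) =====
-- def get_sentiment_label(label_in):
--     sentiment_dict = {
--         'neutral': 0,
--         'positive': 1,
--         'negative': 2,
--         'mixed': 3
--     }
--     label_2 = list(set([quad[2] for quad in label_in]))
--     if len(label_2) == 1:
--         label_2 = sentiment_dict[label_2[0]]
--     else:
--         label_2 = sentiment_dict['mixed']
--     assert label_2 in [0, 1, 2, 3]
--
--     return label_2
-- ===== SOURCE B (Python) =====
-- SENT_NAMES = ['neutral', 'positive', 'negative', 'mixed']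
--
--
-- def get_sentiment_label(label_in):
--     # Single early-return pass with an Optional accumulator; no set and no dict:
--     # the code is the position of the sentiment in SENT_NAMES.
--     seen = None
--     for quad in label_in:
--         s = quad[2]
--         if seen is None:
--             seen = s
--         elif seen != s:
--             return 3  # mixed
--     if seen is None:
--         return 3  # mixed
--     return SENT_NAMES.index(seen)
-- ===== Notes on version B (the rewrite author's own statement) =====
-- stated objective: simpler
-- what changed: Replaces the set-building-and-length-check plus dict lookup with a single early-return scan holding an Optional 'seen' sentiment and a final positional lookup in the name list (no set, no dict).
import Mathlib
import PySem

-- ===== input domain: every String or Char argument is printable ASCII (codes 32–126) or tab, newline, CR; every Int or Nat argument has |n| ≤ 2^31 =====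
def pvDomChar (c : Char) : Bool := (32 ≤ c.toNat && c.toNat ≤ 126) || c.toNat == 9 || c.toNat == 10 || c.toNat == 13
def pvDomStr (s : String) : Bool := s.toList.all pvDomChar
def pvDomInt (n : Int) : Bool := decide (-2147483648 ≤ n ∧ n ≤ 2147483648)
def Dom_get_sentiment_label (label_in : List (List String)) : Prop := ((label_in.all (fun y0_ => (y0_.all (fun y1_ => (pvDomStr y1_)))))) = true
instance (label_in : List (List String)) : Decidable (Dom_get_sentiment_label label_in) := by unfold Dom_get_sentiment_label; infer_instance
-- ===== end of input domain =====

-- B replaces A's set-building/length-check/dict-lookup with an early-return scan over an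
-- Optional accumulator plus a positional lookup in the name list; return-value equivalence on Pre_.

-- ===== PORT A =====
-- sentiment_dict of A
def pvSentDictA : PySem.Dict String Int :=
  PySem.Dict.ofList [("neutral", 0), ("positive", 1), ("negative", 2), ("mixed", 3)]

-- quad[2]; total form used under Pre_ (3 ≤ quad.length, so no IndexError)
def pvThirdA (quad : List String) : String := (PySem.List.pyGet? quad 2).getD ""

def get_sentiment_label (label_in : List (List String)) : Int :=
  -- label_2 = list(set([quad[2] for quad in label_in]))
  let label_2 := PySem.Set.ofList (label_in.map pvThirdA)
  if label_2.length = 1 then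
    -- sentiment_dict[label_2[0]]; the .getD 0 defaults are unreachable under Pre_ (no KeyError/IndexError)
    ((pvSentDictA.get? ((PySem.List.pyGet? label_2 0).getD "")).getD 0)
  else
    pvSentDictA.getD "mixed" 0
  -- assert label_2 in [0,1,2,3] always holds for dict values

-- ===== PORT B =====
-- SENT_NAMES of B
def pvSentNames : List String := ["neutral", "positive", "negative", "mixed"]

-- SENT_NAMES.index(v); the ValueError case (.getD default) is unreachable under Pre_
def pvIndexB (v : String) : Int := ((PySem.List.index? pvSentNames v).getD 0 : Nat)

-- the for-loop with its early 'return 3' and the two trailing returns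
def pvLoopB (seen : Option String) (l : List (List String)) : Int :=
  match l with
  | [] =>
    match seen with
    | none => 3
    | some v => pvIndexB v
  | quad :: rest =>
    let s := (PySem.List.pyGet? quad 2).getD ""   -- quad[2]; total under Pre_
    match seen with
    | none => pvLoopB (some s) rest
    | some v => if v = s then pvLoopB (some v) rest else 3

def get_sentiment_label_alt (label_in : List (List String)) : Int :=
  pvLoopB none label_in

-- ===== PRECONDITION & SPEC =====
-- Pre_ excludes exactly the inputs where the Python A raises: a quad shorter than 3 (IndexError),
-- and the case where all third elements are equal but that single sentiment is not a known name
-- (KeyError in A; B raises ValueError there).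
def Pre_get_sentiment_label (label_in : List (List String)) : Prop :=
  (∀ q ∈ label_in, 3 ≤ q.length) ∧
  (∀ q ∈ label_in, (∀ r ∈ label_in, r.getD 2 "" = q.getD 2 "") →
     q.getD 2 "" ∈ (["neutral", "positive", "negative", "mixed"] : List String))
instance (label_in : List (List String)) : Decidable (Pre_get_sentiment_label label_in) := by
  unfold Pre_get_sentiment_label; infer_instance

def pvWitness_get_sentiment_label : List (List String) :=
  [["a", "b", "positive"], ["c", "d", "negative"]]

def Spec_get_sentiment_label (label_in : List (List String)) (out : Int) : Prop := out = get_sentiment_label_alt label_in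
instance (label_in : List (List String)) (out : Int) : Decidable (Spec_get_sentiment_label label_in out) := by unfold Spec_get_sentiment_label; infer_instance

-- ===== CLAIM (what is proved, stated in full; the proofs are below) =====
def Claim_equal_get_sentiment_label : Prop := ∀ (label_in : List (List String)), Dom_get_sentiment_label label_in → Pre_get_sentiment_label label_in → Spec_get_sentiment_label label_in (get_sentiment_label label_in)

-- ===== LEMMAS AND PROOFS =====

-- folding Set.add over elements all equal to the sole member keeps the singleton
theorem pvFoldAddConst (a : String) (t : List String) (h : ∀ x ∈ t, x = a) :
    t.foldl PySem.Set.add [a] = [a] := by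
  induction t with
  | nil => rfl
  | cons x xs ih =>
    have hx : x = a := h x (by simp)
    subst hx
    simp only [List.foldl_cons]
    have : PySem.Set.add [x] x = [x] := by simp [PySem.Set.add, PySem.Set.contains]
    rw [this]
    exact ih (fun y hy => h y (by simp [hy]))

theorem pvOfListConst (a : String) (t : List String) (h : ∀ x ∈ t, x = a) :
    PySem.Set.ofList (a :: t) = [a] := by
  rw [PySem.Set.ofList_eq_foldl]
  simp only [List.foldl_cons]
  have hadd : PySem.Set.add [] a = [a] := by simp [PySem.Set.add, PySem.Set.contains]
  rw [hadd]
  exact pvFoldAddConst a t h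

theorem pvPyGetSingleton (x : String) : PySem.List.pyGet? [x] (0 : Int) = some x := by
  have h0 : (0 : Int) = ((0 : Nat) : Int) := rfl
  rw [h0, PySem.List.pyGet?_natCast]; rfl

-- B's loop with a committed accumulator is the all-equal-to-v test
theorem pvLoopSome (v : String) (l : List (List String)) :
    pvLoopB (some v) l =
      if l.all (fun quad => (PySem.List.pyGet? quad 2).getD "" == v) then pvIndexB v else 3 := by
  induction l with
  | nil => simp [pvLoopB]
  | cons q rest ih =>
    simp only [pvLoopB, List.all_cons]
    by_cases hq : v = (PySem.List.pyGet? q 2).getD ""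
    · have hs : ((PySem.List.pyGet? q 2).getD "" == v) = true := by
        rw [← hq]; exact beq_self_eq_true v
      simp only [if_pos hq, ih, hs, Bool.true_and]
    · have hs : ((PySem.List.pyGet? q 2).getD "" == v) = false := by
        simp only [beq_eq_false_iff_ne, ne_eq]; exact fun h => hq h.symm
      simp only [if_neg hq, hs, Bool.false_and, Bool.false_eq_true, if_false]

-- ===== VERDICT (by name: the statement is the Claim_ definition above) =====
theorem get_sentiment_label_spec : Claim_equal_get_sentiment_label := by
  intro label_in _ hpre
  obtain ⟨hlen, hkey⟩ := hpre
  unfold Spec_get_sentiment_label get_sentiment_label get_sentiment_label_alt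
  have hthird : ∀ q ∈ label_in, pvThirdA q = q.getD 2 "" := by
    intro q hq
    have h3 := hlen q hq
    unfold pvThirdA
    have h2 : (2 : Int) = ((2 : Nat) : Int) := rfl
    rw [h2, PySem.List.pyGet?_natCast]
    simp [List.getD]
  cases label_in with
  | nil => rfl
  | cons q rest =>
    show _ = pvLoopB (some ((PySem.List.pyGet? q 2).getD "")) rest
    rw [pvLoopSome]
    by_cases hall : ∀ r ∈ q :: rest, pvThirdA r = pvThirdA q
    · -- all third elements equal the first's: set is a singleton, B's scan finds no mismatch
      have hset : PySem.Set.ofList ((q :: rest).map pvThirdA) = [pvThirdA q] := by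
        rw [List.map_cons]
        apply pvOfListConst
        intro x hx
        obtain ⟨r, hr, rfl⟩ := List.mem_map.mp hx
        exact hall r (by simp [hr])
      have hb : (rest.all (fun quad => ((PySem.List.pyGet? quad 2).getD "" == pvThirdA q))) = true := by
        simp only [List.all_eq_true]
        intro r hr
        simpa [pvThirdA] using congrArg (· == pvThirdA q) (hall r (by simp [hr]))
      have hq3 : pvThirdA q = q.getD 2 "" := hthird q (by simp)
      have hmem : q.getD 2 "" ∈ (["neutral", "positive", "negative", "mixed"] : List String) := by
        apply hkey q (by simp)
        intro r hr
        rw [← hthird r hr, ← hthird q (by simp), hall r hr]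
      simp only [hset, List.length_singleton, if_true, pvPyGetSingleton, Option.getD_some]
      rw [show ((PySem.List.pyGet? q 2).getD "") = pvThirdA q from rfl, if_pos hb]
      rw [hq3] at *
      simp only [List.mem_cons, List.not_mem_nil, or_false] at hmem
      rcases hmem with h | h | h | h <;> rw [h] <;> decide
    · -- some third element differs: set has ≥ 2 distinct members, B's scan hits a mismatch
      push Not at hall
      obtain ⟨r, hr, hne⟩ := hall
      have hmem1 : pvThirdA q ∈ PySem.Set.ofList ((q :: rest).map pvThirdA) := by
        rw [PySem.Set.mem_ofList]; exact List.mem_map.mpr ⟨q, by simp, rfl⟩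
      have hmem2 : pvThirdA r ∈ PySem.Set.ofList ((q :: rest).map pvThirdA) := by
        rw [PySem.Set.mem_ofList]; exact List.mem_map.mpr ⟨r, hr, rfl⟩
      have hlen1 : (PySem.Set.ofList ((q :: rest).map pvThirdA)).length ≠ 1 := by
        intro h1
        obtain ⟨c, hc⟩ := List.length_eq_one_iff.mp h1
        rw [hc] at hmem1 hmem2
        simp at hmem1 hmem2
        exact hne (hmem2.trans hmem1.symm)
      have hrrest : r ∈ rest := by
        rcases List.mem_cons.mp hr with h | h
        · subst h; exact absurd rfl hne
        · exact h
      have hb : (rest.all (fun quad => ((PySem.List.pyGet? quad 2).getD "" == pvThirdA q))) = false := by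
        simp only [List.all_eq_false]
        exact ⟨r, hrrest, by simpa [pvThirdA] using hne⟩
      rw [if_neg hlen1]
      rw [show ((PySem.List.pyGet? q 2).getD "") = pvThirdA q from rfl, if_neg (by simp [hb])]
      decide
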